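-- pv_equiv track=rewrite | github.com/mohamedAlaa26/RecommendationSystem | recommendation.py | freq_list_cart_and_items
-- ===== SOURCE A (Python) =====
-- def freq_list_items(user, all_users_stats):
--     user_stats = all_users_stats.get(user, {})
--     freq = {}
--     for item, related_items in user_stats.items():
--         freq[item] = len(related_items)
--     return freq
--
-- def freq_list_cart(user, cart, all_users_stats):
--     user_stats = all_users_stats.get(user, {})
--     freq = {}
--     for cart_item in cart:
--         for item, related_items in user_stats.items():
--             if cart_item in related_items and item not in cart:
--                 if item in freq:
--                     freq[item] += 1
--                 else:
--                     freq[item] = 1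
--     return freq
--
-- def freq_list_cart_and_items(user, cart, all_users_stats):
--     freq_items = freq_list_items(user, all_users_stats)
--     freq_cart = freq_list_cart(user, cart, all_users_stats)
--     combined_freq = {**freq_items, **freq_cart}
--     for item in combined_freq:
--         if item in freq_items and item in freq_cart:
--             combined_freq[item] = freq_items[item] + freq_cart[item]
--     return combined_freq
-- ===== SOURCE B (Python) =====
-- def freq_list_cart_and_items(user, cart, all_users_stats):
--     user_stats = all_users_stats.get(user, {})
--     freq = {}
--     for item, related_items in user_stats.items():
--         count = len(related_items)
--         if item not in cart:
--             for cart_item in cart: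
--                 if cart_item in related_items:
--                     count += 1
--         freq[item] = count
--     return freq
-- ===== Notes on version B (the rewrite author's own statement) =====
-- stated objective: simpler
-- what changed: Replaces A's three-function pipeline (freq_list_items, freq_list_cart with its cart-major nested loop, then a dict-merge plus a fix-up loop over the combined keys) with a single pass over user_stats.items() that computes each item's final count (len(related_items) plus, when the item is not in the cart, one per cart occurrence found in related_items) directly.
import Mathlib
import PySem

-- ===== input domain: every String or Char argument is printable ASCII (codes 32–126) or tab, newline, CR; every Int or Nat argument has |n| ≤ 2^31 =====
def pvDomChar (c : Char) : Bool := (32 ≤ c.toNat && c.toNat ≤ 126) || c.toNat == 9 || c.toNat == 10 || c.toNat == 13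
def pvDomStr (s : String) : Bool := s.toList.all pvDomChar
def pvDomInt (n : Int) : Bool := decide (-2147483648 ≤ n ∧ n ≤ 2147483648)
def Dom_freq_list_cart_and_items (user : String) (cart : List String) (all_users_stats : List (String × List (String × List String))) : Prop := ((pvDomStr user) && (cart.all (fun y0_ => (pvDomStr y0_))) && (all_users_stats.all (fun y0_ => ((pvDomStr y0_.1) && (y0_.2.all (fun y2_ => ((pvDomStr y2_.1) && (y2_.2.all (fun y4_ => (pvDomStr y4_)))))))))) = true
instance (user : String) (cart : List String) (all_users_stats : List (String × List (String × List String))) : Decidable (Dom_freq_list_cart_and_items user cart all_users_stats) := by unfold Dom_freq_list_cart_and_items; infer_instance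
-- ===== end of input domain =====

-- B folds A's three-function pipeline (freq_list_items + freq_list_cart + merge) into one pass over
-- user_stats that computes each item's final count directly; objective: simpler (return value only).

-- ===== PORT A =====
-- all_users_stats.get(user, {}): dict lookup, first match (empty dict -> [])
def pvUserStats (user : String) (all_users_stats : List (String × List (String × List String))) : List (String × List String) :=
  (PySem.Dict.mk all_users_stats).getD user []

-- freq_list_items
def pvFreqListItems (user : String) (all_users_stats : List (String × List (String × List String))) : PySem.Dict String Int :=
  let user_stats := pvUserStats user all_users_stats
  user_stats.foldl (fun freq p => freq.insert p.1 (p.2.length : Int)) PySem.Dict.empty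

-- freq_list_cart
def pvFreqListCart (user : String) (cart : List String) (all_users_stats : List (String × List (String × List String))) : PySem.Dict String Int :=
  let user_stats := pvUserStats user all_users_stats
  cart.foldl (fun freq cart_item =>
    user_stats.foldl (fun freq p =>
      if p.2.contains cart_item && !(cart.contains p.1) then
        (if freq.contains p.1 then freq.insert p.1 (freq.getD p.1 0 + 1) else freq.insert p.1 1)
      else freq) freq) PySem.Dict.empty

def freq_list_cart_and_items (user : String) (cart : List String) (all_users_stats : List (String × List (String × List String))) : List (String × Int) :=
  let freq_items := pvFreqListItems user all_users_stats
  let freq_cart := pvFreqListCart user cart all_users_stats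
  -- {**freq_items, **freq_cart}
  let combined_freq := freq_cart.items.foldl (fun d p => d.insert p.1 p.2) freq_items
  -- for item in combined_freq: …  (freq_items[item] / freq_cart[item] are guarded by the
  -- membership test, so getD _ 0 is exact here)
  (combined_freq.keys.foldl (fun d item =>
      if freq_items.contains item && freq_cart.contains item then
        d.insert item (freq_items.getD item 0 + freq_cart.getD item 0)
      else d) combined_freq).items

-- ===== PORT B =====
def freq_list_cart_and_items_alt (user : String) (cart : List String) (all_users_stats : List (String × List (String × List String))) : List (String × Int) :=
  let user_stats := pvUserStats user all_users_stats
  (user_stats.foldl (fun freq p =>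
      let count : Int := p.2.length
      let count := if !(cart.contains p.1) then
          cart.foldl (fun count cart_item => if p.2.contains cart_item then count + 1 else count) count
        else count
      freq.insert p.1 count) PySem.Dict.empty).items

-- ===== PRECONDITION & SPEC =====
-- Pre_ requires each inner association list (which encodes a Python dict, user_stats) to have
-- pairwise-distinct keys: a Python dict can never contain duplicate keys, so this excludes only
-- assoc lists that do not represent any Python input.
def Pre_freq_list_cart_and_items (user : String) (cart : List String) (all_users_stats : List (String × List (String × List String))) : Prop :=
  ∀ p ∈ all_users_stats, (p.2.map Prod.fst).Nodup
instance (user : String) (cart : List String) (all_users_stats : List (String × List (String × List String))) : Decidable (Pre_freq_list_cart_and_items user cart all_users_stats) := by unfold Pre_freq_list_cart_and_items; infer_instance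

def pvWitness_freq_list_cart_and_items : String × List String × (List (String × List (String × List String))) :=
  ("u", ["x"], [("u", [("a", ["x"]), ("b", ["y"])])])

def Spec_freq_list_cart_and_items (user : String) (cart : List String) (all_users_stats : List (String × List (String × List String))) (out : List (String × Int)) : Prop := out = freq_list_cart_and_items_alt user cart all_users_stats
instance (user : String) (cart : List String) (all_users_stats : List (String × List (String × List String))) (out : List (String × Int)) : Decidable (Spec_freq_list_cart_and_items user cart all_users_stats out) := by unfold Spec_freq_list_cart_and_items; infer_instance

-- ===== CLAIM (what is proved, stated in full; the proofs are below) =====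
def Claim_equal_freq_list_cart_and_items : Prop := ∀ (user : String) (cart : List String) (all_users_stats : List (String × List (String × List String))), Dom_freq_list_cart_and_items user cart all_users_stats → Pre_freq_list_cart_and_items user cart all_users_stats → Spec_freq_list_cart_and_items user cart all_users_stats (freq_list_cart_and_items user cart all_users_stats)

-- ===== LEMMAS AND PROOFS =====

def stepA (cart : List String) (c : String) (d : PySem.Dict String Int) (p : String × List String) : PySem.Dict String Int :=
  if p.2.contains c && !(cart.contains p.1) then
    (if d.contains p.1 then d.insert p.1 (d.getD p.1 0 + 1) else d.insert p.1 1)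
  else d

theorem stepA_eq (cart : List String) (c : String) (d : PySem.Dict String Int) (p : String × List String) :
    stepA cart c d p = if p.2.contains c && !(cart.contains p.1) then d.insert p.1 (d.getD p.1 0 + 1) else d := by
  unfold stepA
  by_cases h : d.contains p.1
  · simp [h]
  · simp only [Bool.not_eq_true] at h
    simp [h, PySem.Dict.getD_of_not_contains _ 0 h]

theorem inner_getD_out (cart : List String) (c : String) (us : List (String × List String))
    (k : String) (hk : k ∉ us.map Prod.fst) (d : PySem.Dict String Int) :
    (us.foldl (stepA cart c) d).getD k 0 = d.getD k 0 := by
  induction us generalizing d with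
  | nil => rfl
  | cons p t ih =>
    simp only [List.map_cons, List.mem_cons, not_or] at hk
    simp only [List.foldl_cons]
    rw [ih hk.2, stepA_eq]
    split
    · simp [PySem.Dict.getD_insert, hk.1]
    · rfl

theorem inner_contains_out (cart : List String) (c : String) (us : List (String × List String))
    (k : String) (hk : k ∉ us.map Prod.fst) (d : PySem.Dict String Int) :
    (us.foldl (stepA cart c) d).contains k = d.contains k := by
  induction us generalizing d with
  | nil => rfl
  | cons p t ih =>
    simp only [List.map_cons, List.mem_cons, not_or] at hk
    simp only [List.foldl_cons]
    rw [ih hk.2, stepA_eq]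
    split
    · simp [PySem.Dict.contains_insert, hk.1]
    · rfl

theorem inner_getD (cart : List String) (c : String) (us : List (String × List String))
    (hn : (us.map Prod.fst).Nodup) (k : String) (r : List String) (hmem : (k, r) ∈ us)
    (d : PySem.Dict String Int) :
    (us.foldl (stepA cart c) d).getD k 0 = d.getD k 0 + (if r.contains c && !(cart.contains k) then 1 else 0) := by
  induction us generalizing d with
  | nil => cases hmem
  | cons p t ih =>
    simp only [List.map_cons, List.nodup_cons] at hn
    simp only [List.foldl_cons]
    rcases List.mem_cons.mp hmem with h | h
    · subst h
      rw [inner_getD_out cart c t k (by simpa using hn.1), stepA_eq]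
      split
      · simp_all [PySem.Dict.getD_insert]
      · simp_all
    · have hne : k ≠ p.1 := by
        rintro rfl
        exact hn.1 (List.mem_map.mpr ⟨(p.1, r), h, rfl⟩)
      rw [ih hn.2 h]
      congr 1
      rw [stepA_eq]
      split
      · simp [PySem.Dict.getD_insert, hne]
      · rfl

theorem inner_contains (cart : List String) (c : String) (us : List (String × List String))
    (hn : (us.map Prod.fst).Nodup) (k : String) (r : List String) (hmem : (k, r) ∈ us)
    (d : PySem.Dict String Int) :
    (us.foldl (stepA cart c) d).contains k = (d.contains k || (r.contains c && !(cart.contains k))) := by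
  induction us generalizing d with
  | nil => cases hmem
  | cons p t ih =>
    simp only [List.map_cons, List.nodup_cons] at hn
    simp only [List.foldl_cons]
    rcases List.mem_cons.mp hmem with h | h
    · subst h
      rw [inner_contains_out cart c t k (by simpa using hn.1), stepA_eq]
      split
      · simp_all [PySem.Dict.contains_insert]
      · simp_all
    · have hne : k ≠ p.1 := by
        rintro rfl
        exact hn.1 (List.mem_map.mpr ⟨(p.1, r), h, rfl⟩)
      rw [ih hn.2 h]
      congr 1
      rw [stepA_eq]
      split
      · simp [PySem.Dict.contains_insert, hne]
      · rfl

theorem outer_getD (cart : List String) (us : List (String × List String))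
    (hn : (us.map Prod.fst).Nodup) (k : String) (r : List String) (hmem : (k, r) ∈ us)
    (cs : List String) (d : PySem.Dict String Int) :
    (cs.foldl (fun d c => us.foldl (stepA cart c) d) d).getD k 0 =
      d.getD k 0 + (if cart.contains k then 0 else (cs.countP (fun c => r.contains c) : Int)) := by
  induction cs generalizing d with
  | nil => simp
  | cons c cs ih =>
    simp only [List.foldl_cons]
    rw [ih, inner_getD cart c us hn k r hmem]
    by_cases hk : k ∈ cart <;> by_cases hc : c ∈ r <;>
      simp [List.countP_cons, hk, hc] <;> push_cast <;> ring

theorem outer_contains (cart : List String) (us : List (String × List String))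
    (hn : (us.map Prod.fst).Nodup) (k : String) (r : List String) (hmem : (k, r) ∈ us)
    (cs : List String) (d : PySem.Dict String Int) :
    (cs.foldl (fun d c => us.foldl (stepA cart c) d) d).contains k =
      (d.contains k || (!(cart.contains k) && cs.any (fun c => r.contains c))) := by
  induction cs generalizing d with
  | nil => simp
  | cons c cs ih =>
    simp only [List.foldl_cons]
    rw [ih, inner_contains cart c us hn k r hmem]
    by_cases hk : k ∈ cart <;> by_cases hc : c ∈ r <;> simp [hk, hc]

theorem outer_contains_out (cart : List String) (us : List (String × List String))
    (k : String) (hk : k ∉ us.map Prod.fst) (cs : List String) (d : PySem.Dict String Int) :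
    (cs.foldl (fun d c => us.foldl (stepA cart c) d) d).contains k = d.contains k := by
  induction cs generalizing d with
  | nil => rfl
  | cons c cs ih => simp only [List.foldl_cons]; rw [ih, inner_contains_out cart c us k hk]

-- get? of a fold of raw pair inserts: first match in l wins, else the base dict
theorem foldl_insert_pairs_get? (l : List (String × Int)) (hl : (l.map Prod.fst).Nodup)
    (d : PySem.Dict String Int) (k : String) :
    (l.foldl (fun d p => d.insert p.1 p.2) d).get? k =
      match (PySem.Dict.mk l).get? k with
      | some v => some v
      | none => d.get? k := by
  induction l generalizing d with
  | nil =>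
    have h0 : (PySem.Dict.mk ([] : List (String × Int))).get? k = none := rfl
    simp [h0]
  | cons p t ih =>
    simp only [List.map_cons, List.nodup_cons] at hl
    simp only [List.foldl_cons]
    rw [ih hl.2]
    rcases p with ⟨a, b⟩
    rw [PySem.Dict.get?_mk_cons]
    by_cases hk : a = k
    · subst hk
      have : (PySem.Dict.mk t).get? a = none := by
        rw [PySem.Dict.get?_eq_none_iff_not_mem_keys]
        simpa [PySem.Dict.keys] using hl.1
      simp [this, PySem.Dict.get?_insert]
    · simp only [beq_iff_eq, hk, if_false]
      have hne : k ≠ a := fun h => hk h.symm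
      cases hget : (PySem.Dict.mk t).get? k
      · simp [PySem.Dict.get?_insert, hne]
      · rfl

-- the conditional final loop: value written depends only on the key
theorem cond_fold_get? (ks : List String) (hk : ks.Nodup) (P : String → Bool) (f : String → Int)
    (d : PySem.Dict String Int) (k : String) :
    (ks.foldl (fun d k => if P k then d.insert k (f k) else d) d).get? k =
      if k ∈ ks ∧ P k = true then some (f k) else d.get? k := by
  induction ks generalizing d with
  | nil => simp
  | cons a t ih =>
    simp only [List.nodup_cons] at hk
    simp only [List.foldl_cons]
    rw [ih hk.2]
    by_cases hka : k = a
    · subst hka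
      by_cases hp : P k = true
      · simp [hk.1, hp, PySem.Dict.get?_insert]
      · simp [hk.1, hp]
    · have hbase : (if P a = true then d.insert a (f a) else d).get? k = d.get? k := by
        split
        · rw [PySem.Dict.get?_insert]; simp [hka]
        · rfl
      rw [hbase]
      simp [List.mem_cons, hka]

theorem cond_fold_keys (ks : List String) (P : String → Bool) (f : String → Int)
    (d : PySem.Dict String Int) (hks : ∀ k ∈ ks, k ∈ d.keys) :
    (ks.foldl (fun d k => if P k then d.insert k (f k) else d) d).keys = d.keys := by
  induction ks generalizing d with
  | nil => rfl
  | cons a t ih =>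
    simp only [List.foldl_cons]
    have ha : a ∈ d.keys := hks a (List.mem_cons_self ..)
    have hcont : d.contains a = true := (PySem.Dict.contains_iff_mem_keys ..).mpr ha
    rw [ih]
    · split
      · exact PySem.Dict.keys_insert_of_contains _ _ hcont
      · rfl
    · intro k hkt
      have := hks k (List.mem_cons_of_mem _ hkt)
      split
      · rw [PySem.Dict.keys_insert_of_contains _ _ hcont]; exact this
      · exact this

theorem update_subset_eq (s : PySem.Set String) (xs : List String) (h : ∀ a ∈ xs, a ∈ s) :
    PySem.Set.update s xs = s := by
  rw [PySem.Set.update_eq_append_filter]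
  have hf : (PySem.Set.ofList xs).filter (fun y => !(PySem.Set.contains s y)) = [] := by
    rw [List.filter_eq_nil_iff]
    intro a ha
    simp only [PySem.Set.contains_iff, Bool.not_eq_true', Bool.not_eq_false]
    exact h a ((PySem.Set.mem_ofList xs a).mp ha)
  rw [hf, List.append_nil]

theorem nodup_keys_stepA_inner (cart : List String) (c : String) (us : List (String × List String))
    (d : PySem.Dict String Int) (hd : d.keys.Nodup) : (us.foldl (stepA cart c) d).keys.Nodup := by
  induction us generalizing d with
  | nil => exact hd
  | cons p t ih =>
    simp only [List.foldl_cons]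
    apply ih
    rw [stepA_eq]
    split
    · exact PySem.Dict.nodup_keys_insert _ _ _ hd
    · exact hd

theorem nodup_keys_stepA_outer (cart : List String) (us : List (String × List String))
    (cs : List String) (d : PySem.Dict String Int) (hd : d.keys.Nodup) :
    (cs.foldl (fun d c => us.foldl (stepA cart c) d) d).keys.Nodup := by
  induction cs generalizing d with
  | nil => exact hd
  | cons c cs ih => exact ih _ (nodup_keys_stepA_inner cart c us d hd)

theorem items_ext_aux (l l' : List (String × Int)) (hkeys : l.map Prod.fst = l'.map Prod.fst)
    (hn : (l.map Prod.fst).Nodup)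
    (hget : ∀ k, (PySem.Dict.mk l).get? k = (PySem.Dict.mk l').get? k) : l = l' := by
  induction l generalizing l' with
  | nil =>
    cases l' with
    | nil => rfl
    | cons q t' => simp at hkeys
  | cons p t ih =>
    cases l' with
    | nil => simp at hkeys
    | cons q t' =>
      rcases p with ⟨a, b⟩; rcases q with ⟨a', b'⟩
      simp only [List.map_cons, List.cons.injEq] at hkeys
      obtain ⟨rfl, htl⟩ : a = a' ∧ t.map Prod.fst = t'.map Prod.fst := hkeys
      simp only [List.map_cons, List.nodup_cons] at hn
      have hval := hget a
      rw [PySem.Dict.get?_mk_cons, PySem.Dict.get?_mk_cons] at hval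
      simp only [beq_self_eq_true, if_true, Option.some.injEq] at hval
      subst hval
      have htail : t = t' := by
        apply ih t' htl hn.2
        intro k
        by_cases hk : a = k
        · subst hk
          have h1 : (PySem.Dict.mk t).get? a = none := by
            rw [PySem.Dict.get?_eq_none_iff_not_mem_keys]
            simpa [PySem.Dict.keys] using hn.1
          have h2 : (PySem.Dict.mk t').get? a = none := by
            rw [PySem.Dict.get?_eq_none_iff_not_mem_keys]
            simpa [PySem.Dict.keys, ← htl] using hn.1
          rw [h1, h2]
        · have := hget k
          rw [PySem.Dict.get?_mk_cons, PySem.Dict.get?_mk_cons] at this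
          simpa [hk] using this
      rw [htail]

theorem items_ext (d d' : PySem.Dict String Int) (hkeys : d.keys = d'.keys) (hn : d.keys.Nodup)
    (hget : ∀ k, d.get? k = d'.get? k) : d = d' := by
  apply PySem.Dict.ext
  exact items_ext_aux d.items d'.items hkeys hn hget

def pvValB (cart : List String) (p : String × List String) : Int :=
  let count : Int := p.2.length
  let count := if !(cart.contains p.1) then
      cart.foldl (fun count cart_item => if p.2.contains cart_item then count + 1 else count) count
    else count
  count

theorem valB_eq (cart : List String) (p : String × List String) :
    pvValB cart p = (p.2.length : Int) +
      (if cart.contains p.1 then 0 else (cart.countP (fun c => p.2.contains c) : Int)) := by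
  have hval : pvValB cart p = if (!cart.contains p.1) = true then
      List.foldl (fun n c => if p.2.contains c = true then n + 1 else n) (p.2.length : Int) cart
    else (p.2.length : Int) := rfl
  rw [hval, PySem.List.foldl_count_if (fun c => p.2.contains c) cart ((p.2.length : Int))]
  by_cases h : p.1 ∈ cart <;> simp [h]

theorem ports_agree (user : String) (cart : List String)
    (aus : List (String × List (String × List String)))
    (hpre : ∀ p ∈ aus, (p.2.map Prod.fst).Nodup) :
    freq_list_cart_and_items user cart aus = freq_list_cart_and_items_alt user cart aus := by
  -- abbreviations
  have hnod : ((pvUserStats user aus).map Prod.fst).Nodup := by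
    unfold pvUserStats
    rw [PySem.Dict.getD_eq_get?_getD]
    cases hget : (PySem.Dict.mk aus).get? user with
    | none => simp
    | some v =>
      have hmem : (user, v) ∈ aus := PySem.Dict.mem_items_of_get?_eq_some _ hget
      simpa using hpre (user, v) hmem
  set us := pvUserStats user aus with hus
  set FI := pvFreqListItems user aus with hFIdef
  set FC := pvFreqListCart user cart aus with hFCdef
  -- FI facts
  have hFI : FI.items = us.map (fun p => (p.1, (p.2.length : Int))) := by
    have h := PySem.Dict.items_foldl_insert_fresh us Prod.fst (fun p => (p.2.length : Int))
      PySem.Dict.empty (fun a _ => PySem.Dict.contains_empty _) hnod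
    simpa using h
  have hFIkeys : FI.keys = us.map Prod.fst := by
    show FI.items.map Prod.fst = _
    rw [hFI, List.map_map]
    rfl
  have hFInodup : FI.keys.Nodup := by rw [hFIkeys]; exact hnod
  have hFIget : ∀ k r, (k, r) ∈ us → FI.get? k = some (r.length : Int) := by
    intro k r hmem
    exact PySem.Dict.get?_of_mem_items FI (hFI ▸ List.mem_map.mpr ⟨(k, r), hmem, rfl⟩) hFInodup
  have hFIget_none : ∀ k, k ∉ us.map Prod.fst → FI.get? k = none := by
    intro k hk
    rw [PySem.Dict.get?_eq_none_iff_not_mem_keys, hFIkeys]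
    exact hk
  have hFIcont : ∀ k, k ∈ us.map Prod.fst → FI.contains k = true := by
    intro k hk
    exact (PySem.Dict.contains_iff_mem_keys _ _).mpr (hFIkeys ▸ hk)
  -- FC facts
  have hFCeq : FC = cart.foldl (fun d c => us.foldl (stepA cart c) d) PySem.Dict.empty := rfl
  have hFCgetD : ∀ k r, (k, r) ∈ us → FC.getD k 0 =
      (if cart.contains k then 0 else (cart.countP (fun c => r.contains c) : Int)) := by
    intro k r hmem
    rw [hFCeq, outer_getD cart us hnod k r hmem cart PySem.Dict.empty, PySem.Dict.getD_empty]
    ring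
  have hFCcont : ∀ k r, (k, r) ∈ us → FC.contains k =
      (!(cart.contains k) && cart.any (fun c => r.contains c)) := by
    intro k r hmem
    rw [hFCeq, outer_contains cart us hnod k r hmem cart PySem.Dict.empty,
      PySem.Dict.contains_empty]
    simp
  have hFCcont_out : ∀ k, k ∉ us.map Prod.fst → FC.contains k = false := by
    intro k hk
    rw [hFCeq, outer_contains_out cart us k hk cart PySem.Dict.empty, PySem.Dict.contains_empty]
  have hFCnodup : FC.keys.Nodup := by
    rw [hFCeq]
    exact nodup_keys_stepA_outer cart us cart PySem.Dict.empty (by simp [PySem.Dict.keys_empty])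
  have hFCsub : ∀ k ∈ FC.keys, k ∈ us.map Prod.fst := by
    intro k hk
    by_contra hout
    have := hFCcont_out k hout
    rw [(PySem.Dict.contains_iff_mem_keys FC k).mpr hk] at this
    cases this
  -- C0 facts
  set C0 := FC.items.foldl (fun d p => d.insert p.1 p.2) FI with hC0def
  have hC0keys : C0.keys = FI.keys := by
    have h : C0.keys = PySem.Set.update FI.keys (FC.items.map Prod.fst) :=
      PySem.Dict.keys_foldl_insert_key FC.items Prod.fst (fun _ p => p.2) FI
    rw [h]
    apply update_subset_eq
    intro a ha
    rw [hFIkeys]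
    exact hFCsub a ha
  have hC0get : ∀ k, C0.get? k =
      (match FC.get? k with | some v => some v | none => FI.get? k) :=
    fun k => foldl_insert_pairs_get? FC.items hFCnodup FI k
  -- final A dict
  have hA : freq_list_cart_and_items user cart aus =
      (C0.keys.foldl (fun d item =>
        if FI.contains item && FC.contains item then
          d.insert item (FI.getD item 0 + FC.getD item 0)
        else d) C0).items := rfl
  set OUT := C0.keys.foldl (fun d item =>
      if FI.contains item && FC.contains item then
        d.insert item (FI.getD item 0 + FC.getD item 0)
      else d) C0 with hOUTdef
  have hC0nodup : C0.keys.Nodup := by rw [hC0keys]; exact hFInodup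
  have hOUTget : ∀ k, OUT.get? k =
      if k ∈ C0.keys ∧ (FI.contains k && FC.contains k) = true
      then some (FI.getD k 0 + FC.getD k 0) else C0.get? k :=
    fun k => cond_fold_get? C0.keys hC0nodup
      (fun k => FI.contains k && FC.contains k) (fun k => FI.getD k 0 + FC.getD k 0) C0 k
  have hOUTkeys : OUT.keys = C0.keys :=
    cond_fold_keys C0.keys (fun k => FI.contains k && FC.contains k)
      (fun k => FI.getD k 0 + FC.getD k 0) C0 (fun _ h => h)
  -- B dict
  set DB := us.foldl (fun d p => d.insert p.1 (pvValB cart p)) PySem.Dict.empty with hDBdef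
  have hB : freq_list_cart_and_items_alt user cart aus = DB.items := rfl
  have hDB : DB.items = us.map (fun p => (p.1, pvValB cart p)) := by
    have h := PySem.Dict.items_foldl_insert_fresh us Prod.fst (pvValB cart)
      PySem.Dict.empty (fun a _ => PySem.Dict.contains_empty _) hnod
    simpa using h
  have hDBkeys : DB.keys = us.map Prod.fst := by
    show DB.items.map Prod.fst = _
    rw [hDB, List.map_map]
    rfl
  have hDBnodup : DB.keys.Nodup := by rw [hDBkeys]; exact hnod
  have hDBget : ∀ k r, (k, r) ∈ us → DB.get? k = some (pvValB cart (k, r)) := by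
    intro k r hmem
    exact PySem.Dict.get?_of_mem_items DB (hDB ▸ List.mem_map.mpr ⟨(k, r), hmem, rfl⟩) hDBnodup
  have hDBget_none : ∀ k, k ∉ us.map Prod.fst → DB.get? k = none := by
    intro k hk
    rw [PySem.Dict.get?_eq_none_iff_not_mem_keys, hDBkeys]
    exact hk
  -- assemble
  rw [hA, hB]
  congr 1
  apply items_ext
  · rw [hOUTkeys, hC0keys, hFIkeys, hDBkeys]
  · rw [hOUTkeys, hC0keys]; exact hFInodup
  · intro k
    rw [hOUTget k]
    by_cases hk : k ∈ us.map Prod.fst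
    · obtain ⟨p, hp, rfl⟩ := List.mem_map.mp hk
      have hmem : (p.1, p.2) ∈ us := by simpa using hp
      rw [hDBget p.1 p.2 hmem, valB_eq]
      have hCk : p.1 ∈ C0.keys := by rw [hC0keys, hFIkeys]; exact hk
      have hFIc := hFIcont p.1 hk
      by_cases hc : cart.contains p.1 = true
      · -- in cart: FC has no entry for p.1
        have hfc : FC.contains p.1 = false := by rw [hFCcont p.1 p.2 hmem, hc]; simp
        rw [hC0get]
        have hn : FC.get? p.1 = none := (PySem.Dict.get?_eq_none_iff_contains _ _).mpr hfc
        have hcm : p.1 ∈ cart := by simpa using hc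
        simp [hfc, hn, hFIget p.1 p.2 hmem, hcm]
      · simp only [Bool.not_eq_true] at hc
        by_cases hany : cart.any (fun c => p.2.contains c) = true
        · have hfc : FC.contains p.1 = true := by
            rw [hFCcont p.1 p.2 hmem, hc, hany]; rfl
          have hval : FC.getD p.1 0 = (cart.countP (fun c => p.2.contains c) : Int) := by
            rw [hFCgetD p.1 p.2 hmem, hc]; simp
          have hfiv : FI.getD p.1 0 = (p.2.length : Int) :=
            PySem.Dict.getD_of_get?_eq_some FI 0 (hFIget p.1 p.2 hmem)
          have hcm : p.1 ∉ cart := by simpa using hc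
          simp [hCk, hFIc, hfc, hval, hfiv, hcm]
        · have hfc : FC.contains p.1 = false := by
            rw [hFCcont p.1 p.2 hmem]
            simp only [Bool.eq_false_iff]
            intro hcon
            rw [Bool.and_eq_true] at hcon
            exact hany hcon.2
          have hall : ∀ a ∈ cart, a ∉ p.2 := by simpa [List.any_eq_true] using hany
          have hcnt : cart.countP (fun c => p.2.contains c) = 0 := by
            rw [List.countP_eq_zero]
            intro a ha
            simp [hall a ha]
          rw [hC0get]
          have hn : FC.get? p.1 = none := (PySem.Dict.get?_eq_none_iff_contains _ _).mpr hfc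
          have hcm : p.1 ∉ cart := by simpa using hc
          simp [hfc, hn, hFIget p.1 p.2 hmem, hcm, hcnt]
          exact hall
    · have hfcn : FC.get? k = none :=
        (PySem.Dict.get?_eq_none_iff_contains _ _).mpr (hFCcont_out k hk)
      have hkC0 : k ∉ C0.keys := by rw [hC0keys, hFIkeys]; exact hk
      rw [hC0get]
      simp [hkC0, hfcn, hFIget_none k hk, hDBget_none k hk]

-- ===== VERDICT (by name: the statement is the Claim_ definition above) =====
theorem freq_list_cart_and_items_spec : Claim_equal_freq_list_cart_and_items := by
  intro user cart all_users_stats _hdom hpre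
  exact ports_agree user cart all_users_stats hpre
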